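-- pv_equiv track=rewrite | github.com/premkumark2005/Task_Scheduling | TaskScheduling.py | greedy_task_scheduling
-- ===== SOURCE A (Python) =====
-- def greedy_task_scheduling(tasks, num_workers):
--
--     tasks.sort(key=lambda x: x[1], reverse=True)
--
--
--     workers = [0] * num_workers
--
--
--     task_assignment = [[] for _ in range(num_workers)]
--
--     for task_name, task_time in tasks:
--
--         min_worker = workers.index(min(workers))
--         workers[min_worker] += task_time
--         task_assignment[min_worker].append((task_name, task_time))
--
--     return task_assignment, workers
-- ===== SOURCE B (Python) =====
-- def greedy_task_scheduling(tasks, num_workers):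
--     # Sort descending by duration (stable), same in-place mutation as A.
--     tasks.sort(key=lambda x: x[1], reverse=True)
--
--     loads = [0] * num_workers
--     assignment = [[] for _ in range(num_workers)]
--
--     # Pool of (load, worker_index) pairs kept sorted ascending lexicographically:
--     # the head is always the least-loaded worker (smallest index on ties), so
--     # A's per-task min+index scan over all workers disappears; the updated pair
--     # is re-inserted at the position found by a hand-written binary search.
--     pool = [(0, i) for i in range(num_workers)]
--
--     for name, t in tasks:
--         load, idx = pool.pop(0)
--         new = load + t
--         loads[idx] = new
--         assignment[idx].append((name, t))
--         lo, hi = 0, len(pool)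
--         while lo < hi:
--             mid = (lo + hi) // 2
--             if pool[mid] < (new, idx):
--                 lo = mid + 1
--             else:
--                 hi = mid
--         pool.insert(lo, (new, idx))
--
--     return assignment, loads
-- ===== Notes on version B (the rewrite author's own statement) =====
-- stated objective: faster
-- what changed: B keeps a pool of (load, worker) pairs sorted ascending lexicographically: it pops the head (least-loaded worker, smallest index on ties) instead of A's per-task min()+index() scans over all workers, and re-inserts the updated pair at the position found by a hand-written binary search.
import Mathlib
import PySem

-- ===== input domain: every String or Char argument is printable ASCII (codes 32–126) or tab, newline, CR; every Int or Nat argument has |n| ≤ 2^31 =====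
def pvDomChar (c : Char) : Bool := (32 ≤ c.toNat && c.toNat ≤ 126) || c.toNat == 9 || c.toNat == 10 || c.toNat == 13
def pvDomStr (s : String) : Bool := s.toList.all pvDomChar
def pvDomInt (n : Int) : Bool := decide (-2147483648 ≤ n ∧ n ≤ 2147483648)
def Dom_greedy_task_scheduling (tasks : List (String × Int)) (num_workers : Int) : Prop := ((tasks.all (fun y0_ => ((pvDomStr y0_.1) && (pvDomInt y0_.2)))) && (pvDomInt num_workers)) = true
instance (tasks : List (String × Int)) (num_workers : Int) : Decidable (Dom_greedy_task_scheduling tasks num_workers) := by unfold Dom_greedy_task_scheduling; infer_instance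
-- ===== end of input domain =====

-- B keeps a pool of (load, worker) pairs sorted ascending, so the head is the least-loaded
-- worker (smallest index on ties) and A's per-task min+index scan over all workers is replaced
-- by a pop plus a binary-search re-insertion (objective: faster, measured).
-- Both A and B sort the caller's `tasks` list in place (same side effect); the equivalence
-- proved here is about the return value.


-- ===== PORT A =====
-- one loop iteration of A: scan for the minimum load, then for its first index
def pvAStep (s : (List (List (String × Int))) × List Int) (tk : String × Int) :
    (List (List (String × Int))) × List Int :=
  match PySem.List.min? s.2 (fun y => y) with
  | none => s          -- Python: min([]) raises ValueError; excluded by Pre_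
  | some m =>
    match PySem.List.index? s.2 m with
    | none => s
    | some j => (s.1.set j (s.1.getD j [] ++ [tk]), s.2.set j (s.2.getD j 0 + tk.2))

def greedy_task_scheduling (tasks : List (String × Int)) (num_workers : Int) :
    (List (List (String × Int))) × List Int :=
  let tasks := PySem.List.sorted tasks (fun x => x.2) true
  let workers : List Int := List.replicate num_workers.toNat 0
  let task_assignment : List (List (String × Int)) := List.replicate num_workers.toNat []
  tasks.foldl pvAStep (task_assignment, workers)

-- ===== PORT B =====
-- Source B's hand-written binary search: `while lo < hi: mid = (lo+hi)//2; ...`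
-- ((lo+hi)//2 on these nonnegative values is Nat division; pool[mid]? is a guard
-- making the recursion total — mid < hi ≤ len(pool) at every call Python makes)
def pvBisect (pool : List (Int × Nat)) (p : Int × Nat) (lo hi : Nat) : Nat :=
  if lo < hi then
    let mid := (lo + hi) / 2
    match pool[mid]? with
    | some q =>
      if q.1 < p.1 ∨ (q.1 = p.1 ∧ q.2 < p.2) then pvBisect pool p (mid + 1) hi
      else pvBisect pool p lo mid
    | none => lo
  else lo
termination_by hi - lo
decreasing_by all_goals omega

-- Source B's `pool.insert(lo, (new, idx))` at the binary-search position
def pvInsertPool (p : Int × Nat) (pool : List (Int × Nat)) : List (Int × Nat) :=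
  pool.insertIdx (pvBisect pool p 0 pool.length) p

-- one loop iteration of B: pop the head of the sorted pool, reinsert the updated pair
def pvBStep (s : (List (List (String × Int))) × List Int × List (Int × Nat)) (tk : String × Int) :
    (List (List (String × Int))) × List Int × List (Int × Nat) :=
  match s.2.2 with
  | [] => s            -- pool empty: Python's pool.pop(0) raises; excluded by Pre_
  | (load, idx) :: rest =>
    let new := load + tk.2
    (s.1.set idx (s.1.getD idx [] ++ [tk]), s.2.1.set idx new, pvInsertPool (new, idx) rest)

def greedy_task_scheduling_alt (tasks : List (String × Int)) (num_workers : Int) :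
    (List (List (String × Int))) × List Int :=
  let tasks := PySem.List.sorted tasks (fun x => x.2) true
  let w := num_workers.toNat
  let loads : List Int := List.replicate w 0
  let assignment : List (List (String × Int)) := List.replicate w []
  let pool : List (Int × Nat) := (List.range w).map (fun i => ((0 : Int), i))
  let st := tasks.foldl pvBStep (assignment, loads, pool)
  (st.1, st.2.1)

-- ===== PRECONDITION & SPEC =====
-- Pre_ excludes exactly the inputs where A raises: a non-empty task list with
-- num_workers ≤ 0 makes A call min([]) (ValueError); B's pool.pop(0) raises there too.
def Pre_greedy_task_scheduling (tasks : List (String × Int)) (num_workers : Int) : Prop :=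
  tasks = [] ∨ 1 ≤ num_workers
instance (tasks : List (String × Int)) (num_workers : Int) : Decidable (Pre_greedy_task_scheduling tasks num_workers) := by unfold Pre_greedy_task_scheduling; infer_instance

def pvWitness_greedy_task_scheduling : (List (String × Int)) × Int :=
  ([("a", 3), ("b", 1), ("c", 2)], 2)

def Spec_greedy_task_scheduling (tasks : List (String × Int)) (num_workers : Int) (out : (List (List (String × Int))) × List Int) : Prop := out = greedy_task_scheduling_alt tasks num_workers
instance (tasks : List (String × Int)) (num_workers : Int) (out : (List (List (String × Int))) × List Int) : Decidable (Spec_greedy_task_scheduling tasks num_workers out) := by unfold Spec_greedy_task_scheduling; infer_instance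

-- ===== CLAIM (what is proved, stated in full; the proofs are below) =====
def Claim_equal_greedy_task_scheduling : Prop := ∀ (tasks : List (String × Int)) (num_workers : Int), Dom_greedy_task_scheduling tasks num_workers → Pre_greedy_task_scheduling tasks num_workers → Spec_greedy_task_scheduling tasks num_workers (greedy_task_scheduling tasks num_workers)

-- ===== LEMMAS AND PROOFS =====
-- strict lexicographic order on (load, index) pairs: Python's `<` on these tuples
def pvLexLt (a b : Int × Nat) : Prop := a.1 < b.1 ∨ (a.1 = b.1 ∧ a.2 < b.2)

theorem pvLexLt_trans {a b c : Int × Nat} (h1 : pvLexLt a b) (h2 : pvLexLt b c) : pvLexLt a c := by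
  unfold pvLexLt at *; omega

-- proof-side linear insertion: walk past the lexicographically smaller pairs
def pvInsertLin (p : Int × Nat) : List (Int × Nat) → List (Int × Nat)
  | [] => [p]
  | q :: rest =>
    if q.1 < p.1 ∨ (q.1 = p.1 ∧ q.2 < p.2) then q :: pvInsertLin p rest
    else p :: q :: rest

theorem pvInsertLin_perm (p : Int × Nat) (l : List (Int × Nat)) :
    (pvInsertLin p l).Perm (p :: l) := by
  induction l with
  | nil => simp [pvInsertLin]
  | cons q rest ih =>
    simp only [pvInsertLin]
    split_ifs with h
    · exact ((ih.cons q).trans (List.Perm.swap p q rest)).symm.symm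
    · exact List.Perm.refl _

theorem pvInsertLin_pairwise (p : Int × Nat) (l : List (Int × Nat))
    (hl : l.Pairwise pvLexLt) (hne : ∀ q ∈ l, q.2 ≠ p.2) :
    (pvInsertLin p l).Pairwise pvLexLt := by
  induction l with
  | nil => simp [pvInsertLin]
  | cons q rest ih =>
    rcases List.pairwise_cons.1 hl with ⟨hq, hrest⟩
    simp only [pvInsertLin]
    split_ifs with h
    · refine List.pairwise_cons.2 ⟨?_, ih hrest (fun r hr => hne r (by simp [hr]))⟩
      intro r hr
      rcases List.mem_cons.1 ((pvInsertLin_perm p rest).mem_iff.1 hr) with h' | h'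
      · subst h'; exact h
      · exact hq r h'
    · have hqp : pvLexLt p q := by
        have := hne q (by simp)
        unfold pvLexLt at *; omega
      refine List.pairwise_cons.2 ⟨?_, hl⟩
      intro r hr
      rcases List.mem_cons.1 hr with h' | h'
      · subst h'; exact hqp
      · exact pvLexLt_trans hqp (hq r h')

-- the binary search on a sorted pool finds the boundary of the `< p` prefix
theorem pvBisect_spec (l : List (Int × Nat)) (p : Int × Nat)
    (hl : l.Pairwise pvLexLt) :
    ∀ lo hi, lo ≤ hi → hi ≤ l.length →
    (∀ i (h : i < l.length), i < lo → pvLexLt l[i] p) →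
    (∀ i (h : i < l.length), hi ≤ i → ¬ pvLexLt l[i] p) →
    (∀ i (h : i < l.length), i < pvBisect l p lo hi → pvLexLt l[i] p) ∧
    (∀ i (h : i < l.length), pvBisect l p lo hi ≤ i → ¬ pvLexLt l[i] p) ∧
    pvBisect l p lo hi ≤ l.length := by
  have hmono : ∀ i j (hi : i < l.length) (hj : j < l.length), i < j →
      pvLexLt l[i] l[j] := by
    intro i j hi hj hij
    exact List.pairwise_iff_getElem.1 hl i j hi hj hij
  intro lo hi hlohi hhile hlo hhi
  induction hn : hi - lo using Nat.strong_induction_on generalizing lo hi with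
  | _ n ih =>
    by_cases h : lo < hi
    · have hmid : (lo + hi) / 2 < l.length := by omega
      rw [pvBisect, if_pos h]
      simp only [List.getElem?_eq_getElem hmid]
      split_ifs with hc
      · refine ih ((hi - ((lo + hi) / 2 + 1))) (by omega) _ _ (by omega) hhile ?_ hhi rfl
        intro i h' hilt
        rcases Nat.lt_or_ge i ((lo + hi) / 2) with h2 | h2
        · exact pvLexLt_trans (hmono i _ h' hmid h2) hc
        · have : i = (lo + hi) / 2 := by omega
          subst this; exact hc
      · refine ih (((lo + hi) / 2) - lo) (by omega) _ _ (by omega) (by omega) hlo ?_ rfl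
        intro i h' hge hlt
        rcases Nat.lt_or_ge ((lo + hi) / 2) i with h2 | h2
        · exact hc (pvLexLt_trans (hmono _ i hmid h' h2) hlt)
        · have : i = (lo + hi) / 2 := by omega
          subst this; exact hc hlt
    · rw [pvBisect, if_neg h]
      have hlo' : lo = hi := by omega
      exact ⟨fun i h' hi' => hlo i h' hi', fun i h' hge => hhi i h' (by omega), by omega⟩

-- inserting at a position with that boundary property is the linear insertion
theorem pvInsertIdx_eq_lin (p : Int × Nat) :
    ∀ (l : List (Int × Nat)) (k : Nat), k ≤ l.length →
    (∀ i (h : i < l.length), i < k → pvLexLt l[i] p) →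
    (∀ i (h : i < l.length), k ≤ i → ¬ pvLexLt l[i] p) →
    l.insertIdx k p = pvInsertLin p l := by
  intro l
  induction l with
  | nil =>
    intro k hk _ _
    have : k = 0 := by simpa using hk
    subst this; rfl
  | cons q rest ih =>
    intro k hk hlt hge
    match k with
    | 0 =>
      have hq : ¬ pvLexLt q p := hge 0 (by simp) (by omega)
      rw [List.insertIdx_zero]
      simp only [pvInsertLin]
      rw [if_neg (by unfold pvLexLt at hq; omega)]
    | k + 1 =>
      have hq : pvLexLt q p := hlt 0 (by simp) (by omega)
      rw [List.insertIdx_succ_cons]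
      simp only [pvInsertLin]
      rw [if_pos (by unfold pvLexLt at hq; omega)]
      congr 1
      refine ih k (by simpa using hk) ?_ ?_
      · intro i h' hik
        have := hlt (i + 1) (by simpa using h') (by omega)
        simpa using this
      · intro i h' hki
        have := hge (i + 1) (by simpa using h') (by omega)
        simpa using this

-- on a sorted pool, Source B's binary-search insertion IS the linear insertion
theorem pvInsertPool_eq_lin (p : Int × Nat) (l : List (Int × Nat))
    (hl : l.Pairwise pvLexLt) : pvInsertPool p l = pvInsertLin p l := by
  obtain ⟨h1, h2, h3⟩ := pvBisect_spec l p hl 0 l.length (by omega) le_rfl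
    (by omega) (by intro i h hi; omega)
  exact pvInsertIdx_eq_lin p l _ h3 h1 h2

theorem pvInsertPool_perm (p : Int × Nat) (l : List (Int × Nat))
    (hl : l.Pairwise pvLexLt) : (pvInsertPool p l).Perm (p :: l) := by
  rw [pvInsertPool_eq_lin p l hl]; exact pvInsertLin_perm p l

theorem pvInsertPool_pairwise (p : Int × Nat) (l : List (Int × Nat))
    (hl : l.Pairwise pvLexLt) (hne : ∀ q ∈ l, q.2 ≠ p.2) :
    (pvInsertPool p l).Pairwise pvLexLt := by
  rw [pvInsertPool_eq_lin p l hl]; exact pvInsertLin_pairwise p l hl hne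

theorem pvZipIdx_set (l : List Int) (j : Nat) (v : Int) :
    (l.set j v).zipIdx = l.zipIdx.set j (v, j) := by
  apply List.ext_getElem
  · simp
  · intro i h1 h2
    simp only [List.getElem_zipIdx, List.getElem_set]
    have hi : i < l.length := by simpa using h1
    split_ifs with h
    · subst h; simp
    · simp

-- indices occurring in l.zipIdx are exactly 0..len-1, hence nodup via map snd
theorem pvZipIdx_map_snd (l : List Int) : l.zipIdx.map Prod.snd = List.range l.length := by
  apply List.ext_getElem
  · simp
  · intro i h1 h2
    simp

-- the fundamental step: from the invariant, the head of the pool is exactly the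
-- (min, first-argmin) pair that A's scans compute, and the updated pool keeps the invariant
theorem pvPoolStep (loads : List Int) (m : Int) (j : Nat) (rest : List (Int × Nat))
    (hperm : ((m, j) :: rest).Perm loads.zipIdx)
    (hpw : ((m, j) :: rest).Pairwise pvLexLt) (t : Int) :
    PySem.List.min? loads (fun y => y) = some m ∧
    PySem.List.index? loads m = some j ∧
    j < loads.length ∧ loads[j]! = m ∧
    (pvInsertPool (m + t, j) rest).Perm (loads.set j (m + t)).zipIdx ∧
    (pvInsertPool (m + t, j) rest).Pairwise pvLexLt := by
  have hmem : (m, j) ∈ loads.zipIdx := hperm.subset (by simp)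
  have hj : j < loads.length := by
    have := List.mem_zipIdx hmem; omega
  have hlj : loads[j] = m := by
    have := List.mem_zipIdx hmem
    simpa using this.2.2.symm
  have hle : ∀ v i, (v, i) ∈ loads.zipIdx → (v = m ∧ i = j) ∨ pvLexLt (m, j) (v, i) := by
    intro v i hvi
    have hmem2 : (v, i) ∈ (m, j) :: rest := hperm.symm.subset hvi
    rcases List.mem_cons.1 hmem2 with h | h
    · left; simpa [Prod.ext_iff] using h
    · right; exact (List.pairwise_cons.1 hpw).1 _ h
  have hmin : PySem.List.min? loads (fun y => y) = some m := by
    have hne : loads ≠ [] := by intro h; subst h; simp at hj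
    obtain ⟨x, hx⟩ : ∃ x, PySem.List.min? loads (fun y => y) = some x := by
      rcases h : PySem.List.min? loads (fun y => y) with _ | x
      · exact absurd ((PySem.List.min?_eq_none_iff _ _).1 h) hne
      · exact ⟨x, rfl⟩
    have hxm : x ∈ loads := PySem.List.min?_mem hx
    have hxmin : ∀ y ∈ loads, x ≤ y := PySem.List.min?_isMin hx
    have h1 : x ≤ m := hxmin m (hlj ▸ loads.getElem_mem hj)
    obtain ⟨i, hi, hix⟩ := List.mem_iff_getElem.1 hxm
    have h2 : (x, i) ∈ loads.zipIdx := by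
      rw [List.mem_iff_getElem]
      exact ⟨i, by simpa using hi, by simp [List.getElem_zipIdx, hix]⟩
    have := hle x i h2
    have hmx : m ≤ x := by
      rcases this with ⟨h', _⟩ | h'
      · omega
      · unfold pvLexLt at h'; omega
    rw [hx]; congr 1; omega
  have hidx : PySem.List.index? loads m = some j := by
    rw [PySem.List.index?_eq_some_iff]
    refine ⟨loads.take j, loads.drop (j + 1), ?_, by simp [hj.le], ?_⟩
    · conv_lhs => rw [← List.take_append_drop j loads]
      rw [List.drop_eq_getElem_cons hj, hlj]
    · intro hmem'
      obtain ⟨i, hi, hival⟩ := List.mem_iff_getElem.1 hmem'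
      have hi' : i < j := by simp [List.length_take] at hi; omega
      have hival' : loads[i]'(by omega) = m := by
        rw [← hival]; simp [List.getElem_take]
      have h2 : (m, i) ∈ loads.zipIdx := by
        rw [List.mem_iff_getElem]
        exact ⟨i, by simp; omega, by simp [List.getElem_zipIdx, hival']⟩
      rcases hle m i h2 with ⟨_, h'⟩ | h'
      · omega
      · unfold pvLexLt at h'; omega
  -- invariant preservation
  have hdecomp : loads.zipIdx = loads.zipIdx.take j ++ (m, j) :: loads.zipIdx.drop (j + 1) := by
    conv_lhs => rw [← List.take_append_drop j loads.zipIdx]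
    rw [List.drop_eq_getElem_cons (by simpa using hj)]
    simp [List.getElem_zipIdx, hlj]
  have hdecomp' : (loads.set j (m + t)).zipIdx
      = loads.zipIdx.take j ++ (m + t, j) :: loads.zipIdx.drop (j + 1) := by
    rw [pvZipIdx_set, List.set_eq_take_append_cons_drop]
    simp [hj]
  obtain ⟨u, hu⟩ : ∃ u, loads.zipIdx.take j = u := ⟨_, rfl⟩
  obtain ⟨v, hv⟩ : ∃ v, loads.zipIdx.drop (j + 1) = v := ⟨_, rfl⟩
  rw [hu, hv] at hdecomp hdecomp'
  have hrest : rest.Perm (u ++ v) := by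
    have hmid : loads.zipIdx.Perm ((m, j) :: (u ++ v)) := by
      rw [hdecomp]; exact List.perm_middle
    exact List.Perm.cons_inv (hperm.trans hmid)
  have hperm' : (pvInsertPool (m + t, j) rest).Perm (loads.set j (m + t)).zipIdx := by
    refine (pvInsertPool_perm _ _ (List.pairwise_cons.1 hpw).2).trans ?_
    rw [hdecomp']
    exact (hrest.cons _).trans List.perm_middle.symm
  have hsnd : ∀ q ∈ rest, q.2 ≠ j := by
    intro q hq hqj
    have hnd : (((m, j) :: rest).map Prod.snd).Nodup := by
      have := (hperm.map Prod.snd).nodup_iff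
      rw [this, pvZipIdx_map_snd]
      exact List.nodup_range
    simp only [List.map_cons, List.nodup_cons] at hnd
    exact hnd.1 (hqj ▸ List.mem_map_of_mem hq)
  refine ⟨hmin, hidx, hj, by simp [hlj, getElem!_pos, hj], hperm', ?_⟩
  exact pvInsertPool_pairwise _ _ (List.pairwise_cons.1 hpw).2 hsnd

-- the two loops agree, given the pool invariant
theorem pvLoop (ts : List (String × Int)) :
    ∀ (assign : List (List (String × Int))) (loads : List Int) (pool : List (Int × Nat)),
    pool.Perm loads.zipIdx → pool.Pairwise pvLexLt → loads ≠ [] →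
    ts.foldl pvAStep (assign, loads) =
      ((ts.foldl pvBStep (assign, loads, pool)).1,
       (ts.foldl pvBStep (assign, loads, pool)).2.1) := by
  induction ts with
  | nil => intro assign loads pool _ _ _; rfl
  | cons tk ts ih =>
    intro assign loads pool hperm hpw hne
    match hp : pool with
    | [] =>
      exfalso
      have := hperm.length_eq
      simp at this
      exact hne (List.eq_nil_of_length_eq_zero this.symm)
    | (m, j) :: rest =>
      obtain ⟨hmin, hidx, hj, hlj, hperm', hpw'⟩ :=
        pvPoolStep loads m j rest hperm hpw tk.2
      simp only [List.foldl_cons]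
      have hstepA : pvAStep (assign, loads) tk
          = (assign.set j (assign.getD j [] ++ [tk]), loads.set j (m + tk.2)) := by
        simp only [pvAStep, hmin, hidx]
        have : loads.getD j 0 = m := by
          rw [List.getD_eq_getElem _ _ hj]
          simpa [getElem!_pos, hj] using hlj
        rw [this]
      have hstepB : pvBStep (assign, loads, (m, j) :: rest) tk
          = (assign.set j (assign.getD j [] ++ [tk]), loads.set j (m + tk.2),
             pvInsertPool (m + tk.2, j) rest) := rfl
      rw [hstepA, hstepB]
      refine ih _ _ _ hperm' hpw' ?_
      intro h
      have hl0 : loads.length = 0 := by simpa using congrArg List.length h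
      omega

theorem pvInitPool (w : Nat) :
    ((List.range w).map (fun i => ((0 : Int), i))).Perm (List.replicate w (0 : Int)).zipIdx ∧
    ((List.range w).map (fun i => ((0 : Int), i))).Pairwise pvLexLt := by
  constructor
  · have : (List.replicate w (0 : Int)).zipIdx = (List.range w).map (fun i => ((0 : Int), i)) := by
      apply List.ext_getElem
      · simp
      · intro i h1 h2
        simp
    rw [this]
  · refine List.Pairwise.map _ ?_ List.pairwise_lt_range
    intro a b hab
    exact Or.inr ⟨rfl, hab⟩

-- ===== VERDICT (by name: the statement is the Claim_ definition above) =====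
theorem greedy_task_scheduling_spec : Claim_equal_greedy_task_scheduling := by
  intro tasks num_workers _ hpre
  unfold Spec_greedy_task_scheduling
  unfold greedy_task_scheduling greedy_task_scheduling_alt
  rcases hpre with h | h
  · subst h
    simp [PySem.List.sorted]
  · have hw : 1 ≤ num_workers.toNat := by omega
    have hne : (List.replicate num_workers.toNat (0 : Int)) ≠ [] := by
      simp; omega
    obtain ⟨hperm, hpw⟩ := pvInitPool num_workers.toNat
    exact pvLoop _ _ _ _ hperm hpw hne
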